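-- pv_equiv track=rewrite | github.com/ministiy/Habit-Based-Lego-Robot | jupyter/DataManipulation.py | transition_frequency
-- ===== SOURCE A (Python) =====
-- def transition_frequency(transition_array):
--     transition_with_frequency = {}
--     for i in range(len(transition_array)-1):
--         if transition_array[i] not in transition_with_frequency:
--             transition_with_frequency[transition_array[i]] = {}
--             transition_with_frequency[transition_array[i]][transition_array[i+1]] = 1
--
--         elif transition_array[i+1] in transition_with_frequency[transition_array[i]]:
--             transition_with_frequency[transition_array[i]][transition_array[i+1]] += 1
--
--         elif transition_array[i+1] not in transition_with_frequency[transition_array[i]]: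
--             transition_with_frequency[transition_array[i]][transition_array[i+1]] = 1
--
--     return transition_with_frequency
-- ===== SOURCE B (Python) =====
-- def transition_frequency(transition_array):
--     # pass 1: flat count of adjacent pairs
--     counts = {}
--     for pair in zip(transition_array, transition_array[1:]):
--         counts[pair] = counts.get(pair, 0) + 1
--     # pass 2: pivot the flat table into the nested dict
--     result = {}
--     for (a, b), c in counts.items():
--         result.setdefault(a, {})[b] = c
--     return result
-- ===== Notes on version B (the rewrite author's own statement) =====
-- stated objective: alternative
-- what changed: Replaces the single-pass incremental nested-dict build (three membership branches updating an inner dict in place) with a two-pass decomposition: one flat pass counting adjacent pairs in a flat dict keyed by (a,b), then a pivot pass reshaping that flat table into the nested dict with setdefault.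
import Mathlib
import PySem

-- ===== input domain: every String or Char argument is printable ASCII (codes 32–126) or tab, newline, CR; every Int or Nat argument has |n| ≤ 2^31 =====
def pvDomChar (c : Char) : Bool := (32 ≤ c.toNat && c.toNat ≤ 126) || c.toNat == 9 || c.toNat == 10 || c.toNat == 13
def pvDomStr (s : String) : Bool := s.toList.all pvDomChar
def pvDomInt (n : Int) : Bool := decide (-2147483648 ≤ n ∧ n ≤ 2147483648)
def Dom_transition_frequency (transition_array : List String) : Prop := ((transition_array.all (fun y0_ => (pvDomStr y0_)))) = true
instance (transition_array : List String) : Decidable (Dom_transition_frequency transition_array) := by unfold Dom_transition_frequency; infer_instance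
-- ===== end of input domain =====

-- B replaces A's single-pass nested-dict build with a flat pair-count pass followed by a pivot pass (objective: alternative decomposition, same cost).
-- Python's in-place mutation of the inner dict is modelled by re-inserting the updated inner dict at its (unchanged) outer position.

-- ===== PORT A =====
def transition_frequency (transition_array : List String) : List (String × List (String × Int)) :=
  let twf : PySem.Dict String (PySem.Dict String Int) :=
    (PySem.List.pyRange 0 ((transition_array.length : Int) - 1) 1).foldl
      (fun twf i =>
        let x := PySem.List.pyGetD transition_array i ""
        let y := PySem.List.pyGetD transition_array (i + 1) ""
        if twf.contains x = false then
          twf.insert x ((PySem.Dict.empty).insert y 1)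
        else if (twf.getD x PySem.Dict.empty).contains y = true then
          twf.insert x ((twf.getD x PySem.Dict.empty).insert y
            ((twf.getD x PySem.Dict.empty).getD y 0 + 1))
        else
          twf.insert x ((twf.getD x PySem.Dict.empty).insert y 1))
      PySem.Dict.empty
  twf.items.map (fun p => (p.1, p.2.items))

-- ===== PORT B =====
def transition_frequency_alt (transition_array : List String) : List (String × List (String × Int)) :=
  let pairs := transition_array.zip (PySem.List.slice transition_array (some 1) none)
  let counts : PySem.Dict (String × String) Int :=
    pairs.foldl (fun d p => d.insert p (d.getD p 0 + 1)) PySem.Dict.empty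
  let result : PySem.Dict String (PySem.Dict String Int) :=
    counts.items.foldl
      (fun r e =>
        -- result.setdefault(a, {})[b] = c
        let r' := r.setdefault e.1.1 PySem.Dict.empty
        r'.insert e.1.1 ((r'.getD e.1.1 PySem.Dict.empty).insert e.1.2 e.2))
      PySem.Dict.empty
  result.items.map (fun p => (p.1, p.2.items))

-- ===== PRECONDITION & SPEC =====
def Spec_transition_frequency (transition_array : List String) (out : List (String × List (String × Int))) : Prop := out = transition_frequency_alt transition_array
instance (transition_array : List String) (out : List (String × List (String × Int))) : Decidable (Spec_transition_frequency transition_array out) := by unfold Spec_transition_frequency; infer_instance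

-- ===== CLAIM (what is proved, stated in full; the proofs are below) =====
def Claim_equal_transition_frequency : Prop := ∀ (transition_array : List String), Dom_transition_frequency transition_array → Spec_transition_frequency transition_array (transition_frequency transition_array)

-- ===== LEMMAS AND PROOFS =====

-- A's loop body as a function of one adjacent pair
def stepA (d : PySem.Dict String (PySem.Dict String Int)) (p : String × String) :
    PySem.Dict String (PySem.Dict String Int) :=
  if d.contains p.1 = false then
    d.insert p.1 ((PySem.Dict.empty).insert p.2 1)
  else if (d.getD p.1 PySem.Dict.empty).contains p.2 = true then
    d.insert p.1 ((d.getD p.1 PySem.Dict.empty).insert p.2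
      ((d.getD p.1 PySem.Dict.empty).getD p.2 0 + 1))
  else
    d.insert p.1 ((d.getD p.1 PySem.Dict.empty).insert p.2 1)

-- the common primitive of both programs: store value c under outer key a, inner key b
def putPair (d : PySem.Dict String (PySem.Dict String Int)) (a b : String) (c : Int) :
    PySem.Dict String (PySem.Dict String Int) :=
  d.insert a ((d.getD a PySem.Dict.empty).insert b c)

-- the nested dict determined by a flat ((a,b), c) table
def specQ (q : List ((String × String) × Int)) : PySem.Dict String (PySem.Dict String Int) :=
  PySem.Dict.mk ((PySem.Set.ofList (q.map (fun e => e.1.1))).map (fun a =>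
    (a, PySem.Dict.mk ((q.filter (fun e => e.1.1 == a)).map (fun e => (e.1.2, e.2))))))

lemma stepA_eq (d : PySem.Dict String (PySem.Dict String Int)) (p : String × String) :
    stepA d p = putPair d p.1 p.2
      (if (d.getD p.1 PySem.Dict.empty).contains p.2 then
        (d.getD p.1 PySem.Dict.empty).getD p.2 0 + 1 else 1) := by
  unfold stepA putPair
  by_cases h : d.contains p.1
  · by_cases h2 : (d.getD p.1 PySem.Dict.empty).contains p.2 <;> simp [h, h2]
  · have hb : d.contains p.1 = false := by simpa using h
    have hg : d.getD p.1 PySem.Dict.empty = PySem.Dict.empty :=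
      PySem.Dict.getD_of_not_contains d _ hb
    simp [hb, hg, PySem.Dict.contains_empty]

lemma specQ_keys (q : List ((String × String) × Int)) :
    (specQ q).keys = PySem.Set.ofList (q.map (fun e => e.1.1)) := by
  simp [specQ, PySem.Dict.keys, List.map_map, Function.comp_def]

lemma specQ_getD_of_mem (q : List ((String × String) × Int)) (a : String)
    (ha : a ∈ q.map (fun e => e.1.1)) :
    (specQ q).getD a PySem.Dict.empty
      = PySem.Dict.mk ((q.filter (fun e => e.1.1 == a)).map (fun e => (e.1.2, e.2))) := by
  have hk : (specQ q).keys.Nodup := by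
    rw [specQ_keys]; exact PySem.Set.nodup_ofList _
  refine PySem.Dict.getD_of_mem_items _ ?_ hk _
  simp only [specQ]
  exact List.mem_map_of_mem ((PySem.Set.mem_ofList _ _).mpr ha)

lemma specQ_getD_of_not_mem (q : List ((String × String) × Int)) (a : String)
    (ha : a ∉ q.map (fun e => e.1.1)) :
    (specQ q).getD a PySem.Dict.empty = PySem.Dict.empty := by
  refine PySem.Dict.getD_of_not_contains _ _ ?_
  rw [PySem.Dict.contains_eq_decide_mem_keys, specQ_keys]
  simp only [decide_eq_false_iff_not, PySem.Set.mem_ofList]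
  exact ha

lemma inner_keys_nodup (q : List ((String × String) × Int)) (a : String)
    (hq : (q.map (fun e => e.1)).Nodup) :
    ((q.filter (fun e => e.1.1 == a)).map (fun e => e.1.2)).Nodup := by
  have h1 : ((q.filter (fun e => e.1.1 == a)).map (fun e => e.1)).Nodup :=
    hq.sublist ((List.filter_sublist (l := q)).map (fun e : (String × String) × Int => e.1))
  have : (q.filter (fun e => e.1.1 == a)).map (fun e => e.1.2)
      = ((q.filter (fun e => e.1.1 == a)).map (fun e => e.1)).map (fun k => k.2) := by
    simp [List.map_map]
  rw [this]
  refine h1.map_on ?_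
  intro x hx y hy hxy
  rcases List.mem_map.mp hx with ⟨ex, hex, rfl⟩
  rcases List.mem_map.mp hy with ⟨ey, hey, rfl⟩
  have hxa : ex.1.1 = a := by simpa using (List.mem_filter.mp hex).2
  have hya : ey.1.1 = a := by simpa using (List.mem_filter.mp hey).2
  exact Prod.ext (hxa.trans hya.symm) hxy

lemma inner_contains (q : List ((String × String) × Int)) (a b : String) :
    (PySem.Dict.mk ((q.filter (fun e => e.1.1 == a)).map (fun e => (e.1.2, e.2)))).contains b
      = decide ((a, b) ∈ q.map (fun e => e.1)) := by
  rw [PySem.Dict.contains_eq_decide_mem_keys]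
  simp only [PySem.Dict.keys, List.map_map, decide_eq_decide]
  constructor
  · intro h
    rcases List.mem_map.mp h with ⟨e, he, hb⟩
    have hea : e.1.1 = a := by simpa using (List.mem_filter.mp he).2
    have : e.1 = (a, b) := Prod.ext hea (by simpa using hb)
    exact this ▸ List.mem_map_of_mem (List.mem_filter.mp he).1
  · intro h
    rcases List.mem_map.mp h with ⟨e, he, h1⟩
    refine List.mem_map.mpr ⟨e, List.mem_filter.mpr ⟨he, by simp [show e.1.1 = a from congrArg Prod.fst h1]⟩, ?_⟩
    simpa using congrArg Prod.snd h1

lemma inner_getD (q : List ((String × String) × Int)) (e : (String × String) × Int)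
    (hq : (q.map (fun e => e.1)).Nodup) (he : e ∈ q) :
    (PySem.Dict.mk ((q.filter (fun x => x.1.1 == e.1.1)).map (fun x => (x.1.2, x.2)))).getD e.1.2 0
      = e.2 := by
  refine PySem.Dict.getD_of_mem_items _ ?_ ?_ _
  · exact List.mem_map.mpr ⟨e, List.mem_filter.mpr ⟨he, by simp⟩, rfl⟩
  · simpa [PySem.Dict.keys, List.map_map] using inner_keys_nodup q e.1.1 hq

lemma specQ_contains (q : List ((String × String) × Int)) (a : String) :
    (specQ q).contains a = decide (a ∈ q.map (fun e => e.1.1)) := by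
  rw [PySem.Dict.contains_eq_decide_mem_keys, specQ_keys]
  simp [PySem.Set.mem_ofList]

lemma putPair_specQ_mem (q : List ((String × String) × Int)) (a b : String) (c : Int)
    (hab : (a, b) ∈ q.map (fun e => e.1)) :
    putPair (specQ q) a b c
      = specQ (q.map (fun e => if e.1 == (a, b) then ((a, b), c) else e)) := by
  have ha : a ∈ q.map (fun e => e.1.1) := by
    rcases List.mem_map.mp hab with ⟨e, he, h1⟩
    exact List.mem_map.mpr ⟨e, he, congrArg Prod.fst h1⟩
  have hfst : ∀ e : (String × String) × Int,
      (if e.1 == (a, b) then ((a, b), c) else e).1.1 = e.1.1 := by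
    intro e
    by_cases h : (e.1 == (a, b)) = true
    · have h2 : e.1 = (a, b) := by simpa using h
      simp [h2]
    · simp [h]
  have hMfst : (q.map (fun e => if e.1 == (a, b) then ((a, b), c) else e)).map (fun e => e.1.1)
      = q.map (fun e => e.1.1) := by
    simp only [List.map_map, Function.comp_def]
    exact List.map_congr_left (fun e _ => hfst e)
  have hoc : (specQ q).contains a = true := by rw [specQ_contains]; simpa using ha
  have hic : (PySem.Dict.mk ((q.filter (fun e => e.1.1 == a)).map
      (fun e => (e.1.2, e.2)))).contains b = true := by
    rw [inner_contains]; simpa using hab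
  apply PySem.Dict.ext
  unfold putPair
  rw [specQ_getD_of_mem q a ha, PySem.Dict.items_insert_of_contains _ _ hoc]
  simp only [specQ, hMfst, List.map_map, Function.comp_def]
  refine List.map_congr_left ?_
  intro x hx
  by_cases hxa : x = a
  · subst hxa
    simp only [beq_self_eq_true, if_true]
    refine congrArg (Prod.mk x) ?_
    apply PySem.Dict.ext
    rw [PySem.Dict.items_insert_of_contains _ _ hic]
    rw [List.filter_map]
    have h1 : q.filter ((fun e => e.1.1 == x) ∘ (fun e => if e.1 == (x, b) then ((x, b), c) else e))
        = q.filter (fun e => e.1.1 == x) := by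
      refine List.filter_congr ?_
      intro e _
      simp only [Function.comp_def, hfst e]
    rw [h1]
    simp only [List.map_map, Function.comp_def]
    refine List.map_congr_left ?_
    intro e he
    have hex : e.1.1 = x := by simpa using (List.mem_filter.mp he).2
    by_cases heb : (e.1.2 == b) = true
    · have h2 : e.1 = (x, b) := Prod.ext hex (by simpa using heb)
      simp [h2]
    · have h2 : (e.1 == (x, b)) = false := by
        simp only [beq_eq_false_iff_ne, ne_eq]
        intro h3
        exact heb (by simp [congrArg Prod.snd h3])
      simp [heb, h2]
  · have hba : (x == a) = false := by simpa using hxa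
    simp only [hba, Bool.false_eq_true, if_false]
    refine congrArg (Prod.mk x) ?_
    apply PySem.Dict.ext
    rw [List.filter_map]
    have h1 : q.filter ((fun e => e.1.1 == x) ∘ (fun e => if e.1 == (a, b) then ((a, b), c) else e))
        = q.filter (fun e => e.1.1 == x) := by
      refine List.filter_congr ?_
      intro e _
      simp only [Function.comp_def, hfst e]
    rw [h1]
    have h2 : (q.filter (fun e => e.1.1 == x)).map (fun e => if e.1 == (a, b) then ((a, b), c) else e)
        = q.filter (fun e => e.1.1 == x) := by
      have := List.map_congr_left (l := q.filter (fun e => e.1.1 == x))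
        (f := fun e => if e.1 == (a, b) then ((a, b), c) else e) (g := fun e => e) ?_
      · simpa using this
      · intro e he
        have hex : e.1.1 = x := by simpa using (List.mem_filter.mp he).2
        have : (e.1 == (a, b)) = false := by
          simp only [beq_eq_false_iff_ne, ne_eq]
          intro h3
          exact hxa (hex.symm.trans (by simp [congrArg Prod.fst h3]))
        simp [this]
    rw [h2]

lemma putPair_specQ_not_mem (q : List ((String × String) × Int)) (a b : String) (c : Int)
    (hab : (a, b) ∉ q.map (fun e => e.1)) :
    putPair (specQ q) a b c = specQ (q ++ [((a, b), c)]) := by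
  apply PySem.Dict.ext
  unfold putPair
  by_cases ha : a ∈ q.map (fun e => e.1.1)
  · have hoc : (specQ q).contains a = true := by rw [specQ_contains]; simpa using ha
    rw [specQ_getD_of_mem q a ha]
    have hic : (PySem.Dict.mk ((q.filter (fun e => e.1.1 == a)).map
        (fun e => (e.1.2, e.2)))).contains b = false := by
      rw [inner_contains]; simpa using hab
    rw [PySem.Dict.items_insert_of_contains _ _ hoc]
    have hS' : PySem.Set.ofList ((q ++ [((a, b), c)]).map (fun e => e.1.1))
        = PySem.Set.ofList (q.map (fun e => e.1.1)) := by
      simp only [List.map_append, List.map_cons, List.map_nil]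
      rw [PySem.Set.ofList_append_singleton]
      exact PySem.Set.add_of_mem ((PySem.Set.mem_ofList _ _).mpr ha)
    simp only [specQ, hS', List.map_map]
    refine List.map_congr_left ?_
    intro x hx
    simp only [Function.comp_def]
    by_cases hxa : x = a
    · subst hxa
      simp only [beq_self_eq_true, if_true]
      refine congrArg (Prod.mk x) ?_
      apply PySem.Dict.ext
      rw [PySem.Dict.items_insert_of_not_contains _ _ hic]
      simp [List.filter_append]
    · have hba : (x == a) = false := by simpa using hxa
      have hab2 : (a == x) = false := by simpa using (Ne.symm hxa)
      simp [hba, List.filter_append, hab2]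
  · have hoc : (specQ q).contains a = false := by rw [specQ_contains]; simpa using ha
    rw [specQ_getD_of_not_mem q a ha, PySem.Dict.items_insert_of_not_contains _ _ hoc]
    have hnS : a ∉ PySem.Set.ofList (q.map (fun e => e.1.1)) := by
      rw [PySem.Set.mem_ofList]; exact ha
    have hS' : PySem.Set.ofList ((q ++ [((a, b), c)]).map (fun e => e.1.1))
        = PySem.Set.ofList (q.map (fun e => e.1.1)) ++ [a] := by
      simp only [List.map_append, List.map_cons, List.map_nil]
      rw [PySem.Set.ofList_append_singleton]
      exact PySem.Set.add_of_not_mem hnS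
    have hqa : ∀ e ∈ q, (e.1.1 == a) = false := by
      intro e he
      by_contra hcon
      exact ha (List.mem_map.mpr ⟨e, he, by simpa using hcon⟩)
    simp only [specQ]
    rw [hS', List.map_append]
    congr 1
    · refine List.map_congr_left ?_
      intro x hx
      have hxq : x ∈ q.map (fun e => e.1.1) := (PySem.Set.mem_ofList _ _).mp hx
      have hxa : (a == x) = false := by
        simp only [beq_eq_false_iff_ne, ne_eq]
        rintro rfl; exact ha hxq
      simp [List.filter_append, hxa]
    · have hfe : (q.filter (fun e => e.1.1 == a)) = [] :=
        List.filter_eq_nil_iff.mpr (by intro e he; simp [hqa e he])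
      have : (PySem.Dict.empty : PySem.Dict String Int).contains b = false :=
        PySem.Dict.contains_empty b
      simp only [List.map_cons, List.map_nil]
      refine congrArg (fun d => [(a, d)]) ?_
      apply PySem.Dict.ext
      rw [PySem.Dict.items_insert_of_not_contains _ _ this]
      simp [List.filter_append, hfe, PySem.Dict.empty]

lemma aFold_char (ps : List (String × String)) :
    ps.foldl stepA PySem.Dict.empty
      = specQ ((PySem.Set.ofList ps).map (fun k => (k, (ps.count k : Int)))) := by
  induction ps using List.reverseRecOn with
  | nil =>
    apply PySem.Dict.ext
    simp [specQ, PySem.Dict.empty, PySem.Set.ofList]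
  | append_singleton ps p ih =>
    rw [List.foldl_append]
    simp only [List.foldl_cons, List.foldl_nil]
    rw [ih, stepA_eq]
    have hQfst : ((PySem.Set.ofList ps).map (fun k => (k, (ps.count k : Int)))).map (fun e => e.1)
        = PySem.Set.ofList ps := by
      simp [List.map_map, Function.comp_def]
    have hQnd : (((PySem.Set.ofList ps).map (fun k => (k, (ps.count k : Int)))).map
        (fun e => e.1)).Nodup := by
      rw [hQfst]; exact PySem.Set.nodup_ofList ps
    by_cases hp : p ∈ ps
    · have hpm : (p.1, p.2) ∈ ((PySem.Set.ofList ps).map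
          (fun k => (k, (ps.count k : Int)))).map (fun e => e.1) := by
        rw [hQfst]
        exact (PySem.Set.mem_ofList _ _).mpr hp
      have ha1 : p.1 ∈ ((PySem.Set.ofList ps).map
          (fun k => (k, (ps.count k : Int)))).map (fun e => e.1.1) := by
        rcases List.mem_map.mp hpm with ⟨e, he, h1⟩
        exact List.mem_map.mpr ⟨e, he, congrArg Prod.fst h1⟩
      rw [specQ_getD_of_mem _ _ ha1]
      have hcont := inner_contains ((PySem.Set.ofList ps).map
          (fun k => (k, (ps.count k : Int)))) p.1 p.2
      have hc : (PySem.Dict.mk ((((PySem.Set.ofList ps).map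
          (fun k => (k, (ps.count k : Int)))).filter (fun e => e.1.1 == p.1)).map
          (fun e => (e.1.2, e.2)))).contains p.2 = true := by
        rw [hcont]; simpa using hpm
      have hval : (PySem.Dict.mk ((((PySem.Set.ofList ps).map
          (fun k => (k, (ps.count k : Int)))).filter (fun e => e.1.1 == p.1)).map
          (fun e => (e.1.2, e.2)))).getD p.2 0 = (ps.count p : Int) := by
        have hmem : (p, (ps.count p : Int)) ∈ (PySem.Set.ofList ps).map
            (fun k => (k, (ps.count k : Int))) :=
          List.mem_map_of_mem ((PySem.Set.mem_ofList _ _).mpr hp)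
        simpa using inner_getD _ (p, (ps.count p : Int)) hQnd hmem
      rw [hc, hval]
      simp only [if_true]
      rw [putPair_specQ_mem _ p.1 p.2 _ hpm]
      apply congrArg specQ
      have hS : PySem.Set.ofList (ps ++ [p]) = PySem.Set.ofList ps := by
        rw [PySem.Set.ofList_append_singleton]
        exact PySem.Set.add_of_mem ((PySem.Set.mem_ofList _ _).mpr hp)
      rw [hS]
      simp only [List.map_map, Function.comp_def]
      refine List.map_congr_left ?_
      intro k hk
      by_cases hkp : k = p
      · subst hkp
        simp [List.count_append]
      · have h1 : ((k, (ps.count k : Int)).1 == p) = false := by simpa using hkp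
        simp only [h1, Bool.false_eq_true, if_false]
        have h2 : (ps ++ [p]).count k = ps.count k := by
          simp [List.count_append, Ne.symm hkp]
        rw [h2]
    · have hpm : (p.1, p.2) ∉ ((PySem.Set.ofList ps).map
          (fun k => (k, (ps.count k : Int)))).map (fun e => e.1) := by
        rw [hQfst]
        simpa [PySem.Set.mem_ofList] using hp
      have hcf : ((specQ ((PySem.Set.ofList ps).map
          (fun k => (k, (ps.count k : Int))))).getD p.1 PySem.Dict.empty).contains p.2
          = false := by
        by_cases ha1 : p.1 ∈ ((PySem.Set.ofList ps).map
            (fun k => (k, (ps.count k : Int)))).map (fun e => e.1.1)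
        · rw [specQ_getD_of_mem _ _ ha1, inner_contains]
          simpa using hpm
        · rw [specQ_getD_of_not_mem _ _ ha1]
          exact PySem.Dict.contains_empty _
      rw [hcf]
      simp only [Bool.false_eq_true, if_false]
      rw [putPair_specQ_not_mem _ p.1 p.2 1 hpm]
      apply congrArg specQ
      have hS : PySem.Set.ofList (ps ++ [p]) = PySem.Set.ofList ps ++ [p] := by
        rw [PySem.Set.ofList_append_singleton]
        exact PySem.Set.add_of_not_mem (by rw [PySem.Set.mem_ofList]; exact hp)
      rw [hS, List.map_append]
      congr 1
      · refine List.map_congr_left ?_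
        intro k hk
        have hkp : k ≠ p := by
          rintro rfl
          exact hp ((PySem.Set.mem_ofList _ _).mp hk)
        have h2 : (ps ++ [p]).count k = ps.count k := by
          simp [List.count_append, Ne.symm hkp]
        rw [h2]
      · simp [List.count_append, List.count_eq_zero_of_not_mem hp]

lemma setdefault_putPair (r : PySem.Dict String (PySem.Dict String Int)) (a b : String)
    (c : Int) :
    (r.setdefault a PySem.Dict.empty).insert a
      (((r.setdefault a PySem.Dict.empty).getD a PySem.Dict.empty).insert b c)
    = putPair r a b c := by
  unfold putPair
  by_cases h : r.contains a
  · rw [PySem.Dict.setdefault_of_contains _ _ h]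
  · have hb : r.contains a = false := by simpa using h
    rw [PySem.Dict.setdefault_of_not_contains _ _ hb,
        PySem.Dict.getD_insert_self, PySem.Dict.insert_insert_self,
        PySem.Dict.getD_of_not_contains _ _ hb]

lemma pivot_char (q : List ((String × String) × Int)) (hq : (q.map (fun e => e.1)).Nodup) :
    q.foldl (fun r e =>
        let r' := r.setdefault e.1.1 PySem.Dict.empty
        r'.insert e.1.1 ((r'.getD e.1.1 PySem.Dict.empty).insert e.1.2 e.2)) PySem.Dict.empty
      = specQ q := by
  induction q using List.reverseRecOn with
  | nil =>
    apply PySem.Dict.ext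
    simp [specQ, PySem.Dict.empty, PySem.Set.ofList]
  | append_singleton q e ih =>
    have hq' : ((q.map (fun e => e.1)) ++ [e.1]).Nodup := by
      simpa [List.map_append] using hq
    have hnd : (q.map (fun e => e.1)).Nodup :=
      hq'.sublist (List.sublist_append_left _ _)
    have hne : (e.1.1, e.1.2) ∉ q.map (fun x => x.1) := by
      rw [List.nodup_append] at hq'
      intro hmem
      exact (hq'.2.2 _ hmem _ (List.mem_singleton_self _)) rfl
    rw [List.foldl_append]
    simp only [List.foldl_cons, List.foldl_nil]
    rw [ih hnd]
    have hstep := setdefault_putPair (specQ q) e.1.1 e.1.2 e.2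
    rw [hstep, putPair_specQ_not_mem q e.1.1 e.1.2 e.2 hne]

lemma foldl_idx_zip {β : Type} (ta : List String) (g : β → String × String → β) (init : β) :
    (PySem.List.pyRange 0 ((ta.length : Int) - 1) 1).foldl
        (fun d i => g d (PySem.List.pyGetD ta i "", PySem.List.pyGetD ta (i + 1) "")) init
      = (ta.zip ta.tail).foldl g init := by
  cases ta with
  | nil =>
    have h0 : PySem.List.pyRange 0 ((([] : List String).length : Int) - 1) 1 = [] := by decide
    rw [h0]
    simp
  | cons hd tl =>
    have hlen : (((hd :: tl).length : Int) - 1) = ((tl.length : Nat) : Int) := by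
      simp only [List.length_cons]
      push_cast
      ring
    rw [hlen, PySem.List.pyRange_zero_natCast, List.foldl_map]
    have hzip : (hd :: tl).zip (hd :: tl).tail
        = (List.range tl.length).map
            (fun k => ((hd :: tl).getD k "", (hd :: tl).getD (k + 1) "")) := by
      apply List.ext_getElem
      · simp
      · intro i h1 h2
        have hi : i < tl.length := by simpa using h1
        simp [List.getElem_zip, List.getD_eq_getElem?_getD, hi, Nat.lt_succ_of_lt hi]
        rfl
    rw [hzip, List.foldl_map]
    refine PySem.List.foldl_congr_mem _ _ _ _ ?_
    intro acc k hk
    have h1 : PySem.List.pyGetD (hd :: tl) (k : Int) "" = (hd :: tl).getD k "" :=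
      PySem.List.pyGetD_natCast _ _ _
    have h2 : PySem.List.pyGetD (hd :: tl) ((k : Int) + 1) "" = (hd :: tl).getD (k + 1) "" := by
      have : ((k : Int) + 1) = ((k + 1 : Nat) : Int) := by push_cast; ring
      rw [this]
      exact PySem.List.pyGetD_natCast _ _ _
    rw [h1, h2]

-- ===== VERDICT (by name: the statement is the Claim_ definition above) =====
theorem transition_frequency_spec : Claim_equal_transition_frequency := by
  intro ta _
  show transition_frequency ta = transition_frequency_alt ta
  have hA : transition_frequency ta
      = (((ta.zip ta.tail).foldl stepA PySem.Dict.empty).items).map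
          (fun p => (p.1, p.2.items)) :=
    congrArg (fun d : PySem.Dict String (PySem.Dict String Int) =>
        d.items.map (fun p : String × PySem.Dict String Int => (p.1, p.2.items)))
      (foldl_idx_zip ta stepA PySem.Dict.empty)
  have hB : transition_frequency_alt ta
      = (specQ ((PySem.Set.ofList (ta.zip ta.tail)).map
          (fun k => (k, ((ta.zip ta.tail).count k : Int))))).items.map
          (fun p => (p.1, p.2.items)) := by
    have hstart : transition_frequency_alt ta
        = (((ta.zip (PySem.List.slice ta (some 1) none)).foldl
              (fun d p => d.insert p (d.getD p 0 + 1)) PySem.Dict.empty).items.foldl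
              (fun r e =>
                let r' := r.setdefault e.1.1 PySem.Dict.empty
                r'.insert e.1.1 ((r'.getD e.1.1 PySem.Dict.empty).insert e.1.2 e.2))
              PySem.Dict.empty).items.map (fun p => (p.1, p.2.items)) := rfl
    have hnd : ((((PySem.Set.ofList (ta.zip ta.tail)).map
        (fun k => (k, ((ta.zip ta.tail).count k : Int))))).map (fun e => e.1)).Nodup := by
      simp only [List.map_map, Function.comp_def]
      simp [PySem.Set.nodup_ofList (ta.zip ta.tail)]
    rw [hstart, PySem.List.slice_from_one, PySem.Dict.foldl_insert_getD_add_one_eq_counter,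
        PySem.Dict.items_counter, pivot_char _ hnd]
  rw [hA, aFold_char, hB]
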